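-- pv_equiv track=rewrite | github.com/sancern-zhou/suyuan | app/tools/office/word_tool.py | _find_end_index_by_chars
-- ===== SOURCE A (Python) =====
-- from typing import Dict, Any, List
--
-- def _find_end_index_by_chars(
--
--     paragraphs: List[str],
--     start: int,
--     max_chars: int
-- ) -> int:
--     """根据字符数限制找到结束索引"""
--     char_count = 0
--     for i in range(start, len(paragraphs)):
--         char_count += len(paragraphs[i]) + 2  # +2 for "\n\n"
--         if char_count > max_chars:
--             return i
--     return len(paragraphs)
-- ===== SOURCE B (Python) =====
-- from typing import List
--
--
-- def _find_end_index_by_chars(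
--     paragraphs: List[str],
--     start: int,
--     max_chars: int
-- ) -> int:
--     """Prefix sums + hand-written binary search for the first cumulative
--     count strictly greater than max_chars (bisect_right semantics)."""
--     prefix = []
--     total = 0
--     for i in range(start, len(paragraphs)):
--         total += len(paragraphs[i]) + 2  # +2 for "\n\n"
--         prefix.append(total)
--     lo, hi = 0, len(prefix)
--     while lo < hi:
--         mid = (lo + hi) // 2
--         if prefix[mid] <= max_chars:
--             lo = mid + 1
--         else:
--             hi = mid
--     if lo < len(prefix):
--         return start + lo
--     return len(paragraphs)
-- ===== Notes on version B (the rewrite author's own statement) =====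
-- stated objective: alternative
-- what changed: Replaced A's single linear scan with early return by building a prefix-sum list of cumulative character counts and locating the first total strictly greater than max_chars with a hand-written binary search (bisect_right semantics).
import Mathlib
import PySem

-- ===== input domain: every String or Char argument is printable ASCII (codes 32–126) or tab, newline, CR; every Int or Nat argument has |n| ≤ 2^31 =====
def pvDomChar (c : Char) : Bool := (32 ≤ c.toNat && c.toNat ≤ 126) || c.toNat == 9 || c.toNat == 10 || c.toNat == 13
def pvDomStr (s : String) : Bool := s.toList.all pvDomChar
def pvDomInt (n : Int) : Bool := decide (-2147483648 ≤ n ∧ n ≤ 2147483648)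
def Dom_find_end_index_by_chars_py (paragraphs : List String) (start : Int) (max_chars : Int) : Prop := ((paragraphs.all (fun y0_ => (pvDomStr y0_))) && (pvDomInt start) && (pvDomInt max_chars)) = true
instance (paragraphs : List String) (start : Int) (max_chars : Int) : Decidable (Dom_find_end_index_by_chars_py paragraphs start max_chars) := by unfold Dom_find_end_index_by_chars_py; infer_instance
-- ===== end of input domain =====

-- B replaces A's linear threshold scan by a prefix-sum list plus a hand-written
-- binary search (bisect_right semantics); alternative decomposition, not faster.

-- ===== PORT A =====
-- A's for-loop with early return: recursion over the index list, carrying char_count.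
def pvALoop (paragraphs : List String) (max_chars : Int) : List Int → Int → Int
  | [], _ => (paragraphs.length : Int)
  | i :: rest, cc =>
    let cc' := cc + (PySem.Str.len ((PySem.List.pyGet? paragraphs i).getD "") + 2)
    if cc' > max_chars then i else pvALoop paragraphs max_chars rest cc'

def find_end_index_by_chars_py (paragraphs : List String) (start : Int) (max_chars : Int) : Int :=
  pvALoop paragraphs max_chars (PySem.List.pyRange start (paragraphs.length : Int) 1) 0

-- ===== PORT B =====
-- Source B's while-loop: tail recursion on (lo, hi); indices are always in range, so getD is exact.
def pvBSearch (pf : List Int) (max_chars : Int) (lo hi : Nat) : Nat :=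
  if h : lo < hi then
    let mid := (lo + hi) / 2
    if pf.getD mid 0 ≤ max_chars then pvBSearch pf max_chars (mid + 1) hi
    else pvBSearch pf max_chars lo mid
  else lo
termination_by hi - lo
decreasing_by all_goals omega

def find_end_index_by_chars_py_alt (paragraphs : List String) (start : Int) (max_chars : Int) : Int :=
  let pf := ((PySem.List.pyRange start (paragraphs.length : Int) 1).foldl
      (fun (st : Int × List Int) i =>
        let t := st.1 + (PySem.Str.len ((PySem.List.pyGet? paragraphs i).getD "") + 2)
        (t, st.2 ++ [t])) (0, ([] : List Int))).2
  let lo := pvBSearch pf max_chars 0 pf.length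
  if lo < pf.length then start + (lo : Int) else (paragraphs.length : Int)

-- ===== PRECONDITION & SPEC =====
-- Pre_ excludes exactly the inputs where Python A raises IndexError: start < -len(paragraphs)
-- makes the first access paragraphs[start] invalid (Python B raises there too).
def Pre_find_end_index_by_chars_py (paragraphs : List String) (start : Int) (max_chars : Int) : Prop :=
  -(paragraphs.length : Int) ≤ start

instance (paragraphs : List String) (start : Int) (max_chars : Int) : Decidable (Pre_find_end_index_by_chars_py paragraphs start max_chars) := by unfold Pre_find_end_index_by_chars_py; infer_instance

def pvWitness_find_end_index_by_chars_py : List String × Int × Int := (["ab", "cde"], 0, 5)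

def Spec_find_end_index_by_chars_py (paragraphs : List String) (start : Int) (max_chars : Int) (out : Int) : Prop := out = find_end_index_by_chars_py_alt paragraphs start max_chars
instance (paragraphs : List String) (start : Int) (max_chars : Int) (out : Int) : Decidable (Spec_find_end_index_by_chars_py paragraphs start max_chars out) := by unfold Spec_find_end_index_by_chars_py; infer_instance

-- ===== CLAIM (what is proved, stated in full; the proofs are below) =====
def Claim_equal_find_end_index_by_chars_py : Prop := ∀ (paragraphs : List String) (start : Int) (max_chars : Int), Dom_find_end_index_by_chars_py paragraphs start max_chars → Pre_find_end_index_by_chars_py paragraphs start max_chars → Spec_find_end_index_by_chars_py paragraphs start max_chars (find_end_index_by_chars_py paragraphs start max_chars)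

-- ===== LEMMAS AND PROOFS =====

-- The list of running totals B builds, started from c.
def pvPrefixFrom (c : Int) : List Int → List Int
  | [] => []
  | v :: vs => (c + v) :: pvPrefixFrom (c + v) vs

theorem pvPrefixFrom_length (c : Int) (vs : List Int) :
    (pvPrefixFrom c vs).length = vs.length := by
  induction vs generalizing c with
  | nil => rfl
  | cons v vs ih => simp [pvPrefixFrom, ih]

theorem pvPrefixFrom_getD (vs : List Int) :
    ∀ (c : Int) (k : Nat), k < vs.length →
      (pvPrefixFrom c vs).getD k 0 = c + (vs.take (k + 1)).sum := by
  induction vs with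
  | nil => intro c k h; simp at h
  | cons v vs ih =>
    intro c k h
    cases k with
    | zero => simp [pvPrefixFrom]
    | succ k =>
      simp only [pvPrefixFrom, List.getD_cons_succ, List.take, List.sum_cons]
      rw [ih (c + v) k (by simpa using h)]
      ring

theorem pvTakeSumMono (vs : List Int) (hn : ∀ v ∈ vs, 0 ≤ v) :
    ∀ j k : Nat, j ≤ k → (vs.take j).sum ≤ (vs.take k).sum := by
  intro j k hjk
  have h : vs.take k = vs.take j ++ ((vs.drop j).take (k - j)) := by
    rw [← List.take_add]
    congr 1
    omega
  rw [h, List.sum_append]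
  have : 0 ≤ (((vs.drop j).take (k - j)).sum) := by
    apply List.sum_nonneg
    intro x hx
    exact hn x (List.mem_of_mem_drop (List.mem_of_mem_take hx))
  omega

theorem pvPrefixMono (c : Int) (vs : List Int) (hn : ∀ v ∈ vs, 0 ≤ v) :
    ∀ j k : Nat, j ≤ k → k < (pvPrefixFrom c vs).length →
      (pvPrefixFrom c vs).getD j 0 ≤ (pvPrefixFrom c vs).getD k 0 := by
  intro j k hjk hk
  rw [pvPrefixFrom_length] at hk
  rw [pvPrefixFrom_getD vs c j (by omega), pvPrefixFrom_getD vs c k hk]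
  have := pvTakeSumMono vs hn (j + 1) (k + 1) (by omega)
  omega

-- pvBSearch returns the split point: everything before it is ≤ max_chars, everything from it on is > max_chars.
theorem pvBSearch_spec (pf : List Int) (max_chars : Int)
    (mono : ∀ j k : Nat, j ≤ k → k < pf.length → pf.getD j 0 ≤ pf.getD k 0) :
    ∀ (fuel lo hi : Nat), hi - lo ≤ fuel → lo ≤ hi → hi ≤ pf.length →
      (∀ m, m < lo → pf.getD m 0 ≤ max_chars) →
      (∀ m, hi ≤ m → m < pf.length → max_chars < pf.getD m 0) →
      lo ≤ pvBSearch pf max_chars lo hi ∧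
      pvBSearch pf max_chars lo hi ≤ hi ∧
      (∀ m, m < pvBSearch pf max_chars lo hi → pf.getD m 0 ≤ max_chars) ∧
      (∀ m, pvBSearch pf max_chars lo hi ≤ m → m < pf.length → max_chars < pf.getD m 0) := by
  intro fuel
  induction fuel with
  | zero =>
    intro lo hi hfuel hlh hhl hlow hhigh
    have : hi = lo := by omega
    subst this
    rw [pvBSearch]
    simp only [lt_irrefl, dite_false]
    exact ⟨le_refl _, le_refl _, hlow, hhigh⟩
  | succ fuel ih =>
    intro lo hi hfuel hlh hhl hlow hhigh
    rw [pvBSearch]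
    by_cases h : lo < hi
    · simp only [h, dite_true]
      have hmidlo : lo ≤ (lo + hi) / 2 := by omega
      have hmidhi : (lo + hi) / 2 < hi := by omega
      by_cases hle : pf.getD ((lo + hi) / 2) 0 ≤ max_chars
      · simp only [hle, if_true]
        apply And.intro
        · have := (ih ((lo + hi) / 2 + 1) hi (by omega) (by omega) hhl
            (fun m hm => le_trans (mono m ((lo + hi) / 2) (by omega) (by omega)) hle) hhigh).1
          omega
        · exact (ih ((lo + hi) / 2 + 1) hi (by omega) (by omega) hhl
            (fun m hm => le_trans (mono m ((lo + hi) / 2) (by omega) (by omega)) hle) hhigh).2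
      · simp only [hle, if_false]
        rw [not_le] at hle
        have hhigh' : ∀ m, (lo + hi) / 2 ≤ m → m < pf.length → max_chars < pf.getD m 0 :=
          fun m hm hml => lt_of_lt_of_le hle (mono ((lo + hi) / 2) m hm hml)
        have := ih lo ((lo + hi) / 2) (by omega) (by omega) (by omega) hlow hhigh'
        exact ⟨this.1, by omega, this.2.2.1, this.2.2.2⟩
    · simp only [h, dite_false]
      have heq : lo = hi := by omega
      subst heq
      exact ⟨le_refl _, le_refl _, hlow, hhigh⟩


-- The per-paragraph contribution, as one function (proof helper only).
def pvF (paragraphs : List String) (i : Int) : Int :=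
  PySem.Str.len ((PySem.List.pyGet? paragraphs i).getD "") + 2

theorem pvFoldB (paragraphs : List String) (L : List Int) :
    ∀ (c : Int) (acc : List Int),
      (L.foldl (fun (st : Int × List Int) i =>
        (st.1 + (PySem.Str.len ((PySem.List.pyGet? paragraphs i).getD "") + 2),
         st.2 ++ [st.1 + (PySem.Str.len ((PySem.List.pyGet? paragraphs i).getD "") + 2)])) (c, acc)).2
      = acc ++ pvPrefixFrom c (L.map (pvF paragraphs)) := by
  induction L with
  | nil => intro c acc; simp [pvPrefixFrom]
  | cons i L ih =>
    intro c acc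
    simp only [List.foldl_cons]
    rw [ih]
    simp [pvPrefixFrom, pvF]

-- A's scan returns the r-th visited index, where r is the split point of the running totals.
theorem pvALoop_char (paragraphs : List String) (max_chars : Int) :
    ∀ (L : List Int) (cc : Int) (r : Nat),
      r ≤ (pvPrefixFrom cc (L.map (pvF paragraphs))).length →
      (∀ m, m < r → (pvPrefixFrom cc (L.map (pvF paragraphs))).getD m 0 ≤ max_chars) →
      (r < (pvPrefixFrom cc (L.map (pvF paragraphs))).length →
        max_chars < (pvPrefixFrom cc (L.map (pvF paragraphs))).getD r 0) →
      pvALoop paragraphs max_chars L cc =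
        if r < L.length then L.getD r 0 else (paragraphs.length : Int) := by
  intro L
  induction L with
  | nil =>
    intro cc r hr _ _
    simp only [List.map_nil, pvPrefixFrom, List.length_nil, Nat.le_zero] at hr
    subst hr
    simp [pvALoop]
  | cons i L ih =>
    intro cc r hr hlow hhigh
    simp only [List.map_cons, pvPrefixFrom, List.length_cons] at hr hlow hhigh
    have hstep : pvALoop paragraphs max_chars (i :: L) cc =
        if cc + pvF paragraphs i > max_chars then i
        else pvALoop paragraphs max_chars L (cc + pvF paragraphs i) := rfl
    rw [hstep]
    by_cases hgt : cc + pvF paragraphs i > max_chars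
    · have hr0 : r = 0 := by
        by_contra hne
        have h0 := hlow 0 (by omega)
        simp only [List.getD_cons_zero] at h0
        omega
      subst hr0
      simp [hgt]
    · rw [if_neg hgt]
      have hrpos : 0 < r := by
        by_contra h0
        have hr0 : r = 0 := by omega
        subst hr0
        have := hhigh (by omega)
        simp only [List.getD_cons_zero] at this
        omega
      obtain ⟨r', rfl⟩ : ∃ r', r = r' + 1 := ⟨r - 1, by omega⟩
      rw [ih (cc + pvF paragraphs i) r' (by rw [pvPrefixFrom_length] at hr ⊢; omega)
            (fun m hm => by have := hlow (m + 1) (by omega); simpa using this)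
            (fun hlt => by have := hhigh (by omega); simpa using this)]
      simp only [List.length_cons, List.getD_cons_succ]
      by_cases hc : r' < L.length
      · rw [if_pos hc, if_pos (by omega)]
      · rw [if_neg hc, if_neg (by omega)]

-- ===== VERDICT (by name: the statement is the Claim_ definition above) =====
theorem find_end_index_by_chars_py_spec : Claim_equal_find_end_index_by_chars_py := by
  intro paragraphs start max_chars _hdom _hpre
  unfold Spec_find_end_index_by_chars_py
  unfold find_end_index_by_chars_py find_end_index_by_chars_py_alt
  simp only [pvFoldB paragraphs, List.nil_append]
  set pf := pvPrefixFrom 0 ((PySem.List.pyRange start (paragraphs.length : Int) 1).map (pvF paragraphs)) with hpf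
  have hlen : pf.length = (PySem.List.pyRange start (paragraphs.length : Int) 1).length := by
    rw [hpf, pvPrefixFrom_length, List.length_map]
  have hnn : ∀ v ∈ (PySem.List.pyRange start (paragraphs.length : Int) 1).map (pvF paragraphs), 0 ≤ v := by
    intro v hv
    rcases List.mem_map.mp hv with ⟨i, _, rfl⟩
    have : 0 ≤ PySem.Str.len ((PySem.List.pyGet? paragraphs i).getD "") := by
      simp [PySem.Str.len_eq]
    simp only [pvF]
    omega
  have mono := pvPrefixMono 0 ((PySem.List.pyRange start (paragraphs.length : Int) 1).map (pvF paragraphs)) hnn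
  have hbs := pvBSearch_spec pf max_chars mono
    pf.length 0 pf.length (by omega) (by omega) (le_refl _)
    (fun m hm => absurd hm (by omega)) (fun m hm hml => absurd hml (by omega))
  set r := pvBSearch pf max_chars 0 pf.length with hrdef
  rw [pvALoop_char paragraphs max_chars (PySem.List.pyRange start (paragraphs.length : Int) 1) 0 r
      hbs.2.1 hbs.2.2.1 (fun hlt => hbs.2.2.2 r (le_refl _) hlt)]
  by_cases hc : r < pf.length
  · have hcL : r < (PySem.List.pyRange start (paragraphs.length : Int) 1).length := hlen ▸ hc
    rw [if_pos hcL, if_pos hc,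
        List.getD_eq_getElem (PySem.List.pyRange start (paragraphs.length : Int) 1) 0 hcL,
        PySem.List.getElem_pyRange_one]
  · have hcL : ¬ r < (PySem.List.pyRange start (paragraphs.length : Int) 1).length :=
      fun h => hc (hlen.symm ▸ h)
    rw [if_neg hcL, if_neg hc]
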